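-- pv_equiv track=rewrite | github.com/CodingKoopa/bmpng | src/lz77.py | string_search
-- ===== SOURCE A (Python) =====
-- MIN_MATCH = 3
--
-- MAX_MATCH = 258
--
-- def string_search(text, pattern):
--     matchidx = None
--     matchlen = 1
--     for i in range(len(text)):
--         num_chars_left = len(text) - i
--         curlen = 0
--         for j in range(min(len(pattern), num_chars_left)):
--             # TODO: special case for repeating past end
--             if text[i + j] != pattern[j]:
--                 break
--             curlen += 1
--             if curlen == MAX_MATCH:
--                 break
--         # We want to take the last (= closest) match, so allow equality.
--         if curlen >= matchlen:
--             matchlen = curlen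
--             matchidx = i
--     if matchlen < MIN_MATCH:
--         matchidx = None
--     if matchidx == None:
--         matchlen = 0
--     return (matchidx, matchlen)
-- ===== SOURCE B (Python) =====
-- MIN_MATCH = 3
--
-- MAX_MATCH = 258
--
-- def string_search(text, pattern):
--     # Pattern-major staged filtering: instead of scanning text positions one by
--     # one, keep the list of text positions whose match with the pattern prefix
--     # is still alive; stage j filters the candidates by pattern[j].  A position
--     # dropped at stage j matched exactly j characters; stages grow, so the last
--     # drop (or the last survivor of all stages) is the rightmost longest match.
--     cap = min(len(pattern), MAX_MATCH)
--     cand = list(range(len(text)))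
--     best_len, best_idx = 0, None
--     j = 0
--     while j < cap and cand:
--         c = pattern[j]
--         survivors = []
--         dropped = None
--         for i in cand:
--             if i + j < len(text) and text[i + j] == c:
--                 survivors.append(i)
--             else:
--                 dropped = i
--         if dropped is not None:
--             best_len, best_idx = j, dropped
--         cand = survivors
--         j += 1
--     if cand:
--         best_len, best_idx = j, cand[-1]
--     if best_len < MIN_MATCH:
--         return (None, 0)
--     return (best_idx, best_len)
-- ===== Notes on version B (the rewrite author's own statement) =====
-- stated objective: alternative
-- what changed: B replaces A's text-major scan (for each text position, compare the pattern prefix char by char) with a pattern-major staged filter: it keeps the list of text positions still matching the pattern prefix and, for each successive pattern character, filters that candidate list once, recording the last position dropped at each stage; the rightmost longest match is the last survivor of all stages, or else the last drop of the deepest stage.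
import Mathlib
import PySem

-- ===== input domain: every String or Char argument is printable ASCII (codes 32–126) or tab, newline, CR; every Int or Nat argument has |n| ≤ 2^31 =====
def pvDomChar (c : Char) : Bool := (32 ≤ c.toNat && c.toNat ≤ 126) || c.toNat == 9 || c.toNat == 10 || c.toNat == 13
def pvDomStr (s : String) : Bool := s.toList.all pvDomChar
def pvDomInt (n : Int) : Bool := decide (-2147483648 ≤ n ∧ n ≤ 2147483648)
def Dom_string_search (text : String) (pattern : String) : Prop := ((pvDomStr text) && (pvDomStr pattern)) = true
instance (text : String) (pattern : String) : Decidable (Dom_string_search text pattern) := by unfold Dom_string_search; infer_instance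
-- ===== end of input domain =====

-- B replaces A's text-major scan (per text position, compare the pattern prefix) by a
-- pattern-major staged filter over a candidate-position list; same exact result.

-- ===== PORT A =====
-- inner 'for j' loop of A: fuel = the length of range(min(len(pattern), num_chars_left)),
-- j and curlen carried as in the Python; the getD reads are text[i+j] / pattern[j]
-- (indices are in range whenever the loop reads them, by the range bound)
def pvA_inner (t p : List Char) (i : Nat) : Nat → Nat → Nat → Nat
  | 0, _, cur => cur
  | f + 1, j, cur =>
    if t.getD (i + j) ' ' ≠ p.getD j ' ' then cur
    else
      let cur := cur + 1
      if cur = 258 then cur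
      else pvA_inner t p i f (j + 1) cur

-- body of A's 'for i' loop (state = (matchidx, matchlen))
def pvA_step (t p : List Char) (st : Option Int × Int) (i : Nat) : Option Int × Int :=
  let curlen := pvA_inner t p i (min p.length (t.length - i)) 0 0
  if (curlen : Int) ≥ st.2 then (some (i : Int), (curlen : Int)) else st

def string_search (text : String) (pattern : String) : Option Int × Int :=
  let t := text.toList
  let p := pattern.toList
  let st := (List.range t.length).foldl (pvA_step t p) (none, 1)
  let matchidx := if st.2 < 3 then none else st.1
  let matchlen := if matchidx = none then (0 : Int) else st.2
  (matchidx, matchlen)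

-- ===== PORT B =====
-- Source B's inner 'for i in cand' loop: state = (survivors, dropped)
def pvB_stage (t p : List Char) (j : Nat) : List Nat → List Nat × Option Nat → List Nat × Option Nat
  | [], st => st
  | i :: r, st =>
    if i + j < t.length ∧ t.getD (i + j) ' ' = p.getD j ' '
    then pvB_stage t p j r (st.1 ++ [i], st.2)
    else pvB_stage t p j r (st.1, some i)

-- Source B's 'while j < cap and cand' loop; fuel = cap - j (so fuel 0 ⇔ j = cap);
-- returns the exit state (best, cand, j)
def pvB_go (t p : List Char) : Nat → Nat → List Nat → Nat × Option Int → (Nat × Option Int) × List Nat × Nat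
  | 0, j, cand, best => (best, cand, j)
  | f + 1, j, cand, best =>
    if cand = [] then (best, cand, j)
    else
      let sd := pvB_stage t p j cand ([], none)
      let best' := match sd.2 with
        | some i => (j, some (i : Int))
        | none => best
      pvB_go t p f (j + 1) sd.1 best'

-- Source B's code after the while loop ('if cand: …; if best_len < MIN_MATCH: …')
def pvB_final (r : (Nat × Option Int) × List Nat × Nat) : Option Int × Int :=
  let best := if r.2.1 ≠ [] then (r.2.2, some ((r.2.1.getLastD 0 : Int))) else r.1
  if best.1 < 3 then (none, 0) else (best.2, (best.1 : Int))

def string_search_alt (text : String) (pattern : String) : Option Int × Int :=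
  let t := text.toList
  let p := pattern.toList
  let cap := min p.length 258
  pvB_final (pvB_go t p cap 0 (List.range t.length) (0, none))

-- ===== PRECONDITION & SPEC =====
def Spec_string_search (text : String) (pattern : String) (out : Option Int × Int) : Prop := out = string_search_alt text pattern
instance (text : String) (pattern : String) (out : Option Int × Int) : Decidable (Spec_string_search text pattern out) := by unfold Spec_string_search; infer_instance

-- ===== CLAIM (what is proved, stated in full; the proofs are below) =====
def Claim_equal_string_search : Prop := ∀ (text : String) (pattern : String), Dom_string_search text pattern → Spec_string_search text pattern (string_search text pattern)

-- ===== LEMMAS AND PROOFS =====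

-- length of the common prefix of two lists
def lcpLen : List Char → List Char → Nat
  | a :: as, b :: bs => if a = b then lcpLen as bs + 1 else 0
  | _, _ => 0

-- the per-position match length both programs compute
def pvV (t p : List Char) (i : Nat) : Nat := min (lcpLen (t.drop i) p) 258

lemma lcpLen_nil_left (ys : List Char) : lcpLen [] ys = 0 := by cases ys <;> rfl

lemma lcpLen_nil_right (xs : List Char) : lcpLen xs [] = 0 := by cases xs <;> rfl

lemma lcpLen_cons (a b : Char) (as bs : List Char) :
    lcpLen (a :: as) (b :: bs) = if a = b then lcpLen as bs + 1 else 0 := rfl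

lemma lcpLen_le_left : ∀ (xs ys : List Char), lcpLen xs ys ≤ xs.length := by
  intro xs
  induction xs with
  | nil => intro ys; simp [lcpLen_nil_left]
  | cons a as ih =>
    intro ys
    cases ys with
    | nil => simp [lcpLen_nil_right]
    | cons b bs =>
      rw [lcpLen_cons]
      split
      · have := ih bs; simp; omega
      · simp

lemma lcpLen_le_right : ∀ (xs ys : List Char), lcpLen xs ys ≤ ys.length := by
  intro xs
  induction xs with
  | nil => intro ys; simp [lcpLen_nil_left]
  | cons a as ih =>
    intro ys
    cases ys with
    | nil => simp [lcpLen_nil_right]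
    | cons b bs =>
      rw [lcpLen_cons]
      split
      · have := ih bs; simp; omega
      · simp

lemma lcpLen_take : ∀ (n : Nat) (xs ys : List Char),
    lcpLen (xs.take n) (ys.take n) = min (lcpLen xs ys) n := by
  intro n
  induction n with
  | zero => intro xs ys; simp [lcpLen_nil_left]
  | succ n ih =>
    intro xs ys
    cases xs with
    | nil => simp [lcpLen_nil_left]
    | cons a as =>
      cases ys with
      | nil => simp [lcpLen_nil_right]
      | cons b bs =>
        simp only [List.take_succ_cons, lcpLen_cons]
        split
        · rw [ih]; omega
        · omega

lemma pvA_inner_eq (t p : List Char) (i : Nat) :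
    ∀ (f j : Nat), j < 258 → j + f ≤ p.length → i + j + f ≤ t.length →
    pvA_inner t p i f j j =
      min (j + lcpLen ((t.drop (i + j)).take f) ((p.drop j).take f)) 258 := by
  intro f
  induction f with
  | zero =>
    intro j hj _ _
    simp [pvA_inner, lcpLen_nil_left]
    omega
  | succ f ih =>
    intro j hj hp ht
    have hjp : j < p.length := by omega
    have hit : i + j < t.length := by omega
    have h1 : t.drop (i + j) = t[i + j] :: t.drop (i + j + 1) :=
      (List.getElem_cons_drop (as := t) (i := i + j) hit).symm
    have h2 : p.drop j = p[j] :: p.drop (j + 1) :=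
      (List.getElem_cons_drop (as := p) (i := j) hjp).symm
    have hgt : t.getD (i + j) ' ' = t[i + j] := List.getD_eq_getElem t ' ' hit
    have hgp : p.getD j ' ' = p[j] := List.getD_eq_getElem p ' ' hjp
    rw [pvA_inner, hgt, hgp, h1, h2]
    simp only [List.take_succ_cons, lcpLen_cons]
    by_cases hab : t[i + j] = p[j]
    · rw [if_neg (by simp [hab]), if_pos hab]
      show (if j + 1 = 258 then j + 1 else pvA_inner t p i f (j + 1) (j + 1)) = _
      by_cases h258 : j + 1 = 258
      · rw [if_pos h258]; omega
      · rw [if_neg h258, ih (j + 1) (by omega) (by omega) (by omega),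
          show i + (j + 1) = i + j + 1 from by omega]
        omega
    · rw [if_pos hab, if_neg hab]
      omega

lemma pvA_inner_v (t p : List Char) (i : Nat) (hi : i < t.length) :
    pvA_inner t p i (min p.length (t.length - i)) 0 0 = pvV t p i := by
  have h := pvA_inner_eq t p i (min p.length (t.length - i)) 0 (by norm_num)
    (by omega) (by omega)
  simp only [Nat.zero_add, Nat.add_zero, List.drop_zero] at h
  rw [h, lcpLen_take]
  have h1 : lcpLen (t.drop i) p ≤ t.length - i := by
    have := lcpLen_le_left (t.drop i) p; simpa using this
  have h2 : lcpLen (t.drop i) p ≤ p.length := lcpLen_le_right _ _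
  rw [pvV]; omega

-- canonical left-to-right recursion: (running max, index of its last occurrence)
def pvSpec (t p : List Char) : Nat → Nat × Option Int
  | 0 => (0, none)
  | k + 1 =>
    if pvV t p k ≥ max (pvSpec t p k).1 1 then (pvV t p k, some (k : Int))
    else pvSpec t p k

lemma pvSpec_cases (t p : List Char) :
    ∀ k, (pvSpec t p k).1 = 0 ∨ ∃ j, (pvSpec t p k).2 = some j := by
  intro k
  induction k with
  | zero => left; rfl
  | succ k ih =>
    rw [pvSpec]
    by_cases hc : pvV t p k ≥ max (pvSpec t p k).1 1
    · rw [if_pos hc]; right; exact ⟨(k : Int), rfl⟩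
    · rw [if_neg hc]; exact ih

-- A's fold over range k equals pvSpec (A's matchlen = max of the running max and 1)
lemma pvA_fold (t p : List Char) :
    ∀ k, k ≤ t.length →
    (List.range k).foldl (pvA_step t p) (none, 1) =
      ((pvSpec t p k).2, ((max (pvSpec t p k).1 1 : Nat) : Int)) := by
  intro k
  induction k with
  | zero => intro _; rfl
  | succ k ih =>
    intro hk
    rw [List.range_succ, List.foldl_append, ih (by omega)]
    simp only [List.foldl_cons, List.foldl_nil, pvA_step]
    rw [pvA_inner_v t p k (by omega)]
    rw [pvSpec]
    by_cases h : pvV t p k ≥ max (pvSpec t p k).1 1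
    · have h' : ((pvV t p k : Nat) : Int) ≥ ((max (pvSpec t p k).1 1 : Nat) : Int) := by
        exact_mod_cast h
      have hmax : max (pvV t p k) 1 = pvV t p k := by omega
      rw [if_pos h', if_pos h]
      simp [hmax]
    · have h' : ¬ ((pvV t p k : Nat) : Int) ≥ ((max (pvSpec t p k).1 1 : Nat) : Int) := by
        exact_mod_cast h
      rw [if_neg h', if_neg h]

-- ghost theory for B: running max and last argmax over range k
def gmax (g : Nat → Nat) : Nat → Nat
  | 0 => 0
  | k + 1 => max (gmax g k) (g k)

def argLast (q : Nat → Prop) [DecidablePred q] : Nat → Option Nat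
  | 0 => none
  | k + 1 => if q k then some k else argLast q k

lemma argLast_none_iff (q : Nat → Prop) [DecidablePred q] :
    ∀ k, argLast q k = none ↔ ∀ i, i < k → ¬ q i := by
  intro k
  induction k with
  | zero => simp [argLast]
  | succ k ih =>
    rw [argLast]
    by_cases h : q k
    · simp [h]
      exact ⟨k, by omega, h⟩
    · rw [if_neg h, ih]
      constructor
      · intro hall i hi
        by_cases hik : i = k
        · subst hik; exact h
        · exact hall i (by omega)
      · intro hall i hi; exact hall i (by omega)

lemma argLast_congr (q r : Nat → Prop) [DecidablePred q] [DecidablePred r] :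
    ∀ k, (∀ i, i < k → (q i ↔ r i)) → argLast q k = argLast r k := by
  intro k
  induction k with
  | zero => intro _; rfl
  | succ k ih =>
    intro h
    rw [argLast, argLast]
    by_cases hq : q k
    · rw [if_pos hq, if_pos ((h k (by omega)).mp hq)]
    · rw [if_neg hq, if_neg (fun hr => hq ((h k (by omega)).mpr hr)),
        ih (fun i hi => h i (by omega))]

lemma argLast_filter (q : Nat → Prop) [DecidablePred q] :
    ∀ k, ((List.range k).filter (fun i => decide (q i))).getLast? = argLast q k := by
  intro k
  induction k with
  | zero => rfl
  | succ k ih =>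
    rw [List.range_succ, List.filter_append, argLast]
    by_cases h : q k
    · simp only [List.filter_cons, List.filter_nil, decide_eq_true h, if_pos h]
      simp
    · simp only [List.filter_cons, List.filter_nil, decide_eq_false h, if_neg h]
      simpa using ih

lemma gmax_ge (g : Nat → Nat) : ∀ k i, i < k → g i ≤ gmax g k := by
  intro k
  induction k with
  | zero => intro i hi; omega
  | succ k ih =>
    intro i hi
    rw [gmax]
    by_cases h : i = k
    · subst h; omega
    · have := ih i (by omega); omega

lemma gmax_le (g : Nat → Nat) : ∀ k c, (∀ i, i < k → g i ≤ c) → gmax g k ≤ c := by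
  intro k
  induction k with
  | zero => intro c _; simp [gmax]
  | succ k ih =>
    intro c h
    rw [gmax]
    have h1 := ih c (fun i hi => h i (by omega))
    have h2 := h k (by omega)
    omega

lemma gmax_congr (g h : Nat → Nat) :
    ∀ k, (∀ i, i < k → g i = h i) → gmax g k = gmax h k := by
  intro k
  induction k with
  | zero => intro _; rfl
  | succ k ih =>
    intro hh
    rw [gmax, gmax, ih (fun i hi => hh i (by omega)), hh k (by omega)]

lemma gmax_attained (g : Nat → Nat) :
    ∀ k, 1 ≤ gmax g k → ∃ i, i < k ∧ g i = gmax g k := by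
  intro k
  induction k with
  | zero => intro h; simp [gmax] at h
  | succ k ih =>
    intro h
    rw [gmax] at h ⊢
    by_cases hk : gmax g k ≤ g k
    · exact ⟨k, by omega, by omega⟩
    · obtain ⟨i, hi, hg⟩ := ih (by omega)
      exact ⟨i, by omega, by omega⟩

-- pvSpec computes (gmax, last argmax) of pvV
lemma pvSpec_char (t p : List Char) :
    ∀ k, pvSpec t p k = (gmax (pvV t p) k,
      if gmax (pvV t p) k = 0 then none
      else (argLast (fun i => pvV t p i = gmax (pvV t p) k) k).map (fun i => (i : Int))) := by
  intro k
  induction k with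
  | zero => simp [pvSpec, gmax]
  | succ k ih =>
    rw [pvSpec, ih, gmax]
    by_cases h : pvV t p k ≥ max (gmax (pvV t p) k) 1
    · rw [if_pos (by simp; omega)]
      have hmax : max (gmax (pvV t p) k) (pvV t p k) = pvV t p k := by omega
      rw [hmax, if_neg (by omega), argLast, if_pos rfl]
      rfl
    · rw [if_neg (by simp; omega)]
      by_cases h0 : gmax (pvV t p) k = 0
      · have hv : pvV t p k = 0 := by omega
        rw [if_pos h0, if_pos (by omega)]
        simp [h0, hv]
      · have hmax : max (gmax (pvV t p) k) (pvV t p k) = gmax (pvV t p) k := by omega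
        rw [hmax, if_neg h0, if_neg h0, argLast, if_neg (by omega)]

-- candidates alive entering stage j, and the best recorded before stage j
def candAt (t p : List Char) (j : Nat) : List Nat :=
  (List.range t.length).filter (fun i => decide (j ≤ lcpLen (t.drop i) p))

def bestAt (t p : List Char) : Nat → Nat × Option Int
  | 0 => (0, none)
  | j + 1 =>
    match argLast (fun i => lcpLen (t.drop i) p = j) t.length with
    | some i => (j, some (i : Int))
    | none => bestAt t p j

lemma getD_drop (t : List Char) (i j : Nat) (d : Char) :
    (t.drop i).getD j d = t.getD (i + j) d := by
  simp [List.getD_eq_getElem?_getD]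

lemma lcp_succ_iff : ∀ (j : Nat) (xs ys : List Char),
    j + 1 ≤ lcpLen xs ys ↔
      (j ≤ lcpLen xs ys ∧ j < xs.length ∧ j < ys.length ∧ xs.getD j ' ' = ys.getD j ' ') := by
  intro j
  induction j with
  | zero =>
    intro xs ys
    cases xs with
    | nil => simp [lcpLen_nil_left]
    | cons a as =>
      cases ys with
      | nil => simp [lcpLen_nil_right]
      | cons b bs =>
        rw [lcpLen_cons]
        by_cases h : a = b <;> simp [h]
  | succ j ih =>
    intro xs ys
    cases xs with
    | nil => simp [lcpLen_nil_left]
    | cons a as =>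
      cases ys with
      | nil => simp [lcpLen_nil_right]
      | cons b bs =>
        rw [lcpLen_cons]
        by_cases h : a = b
        · rw [if_pos h]
          have hih := ih as bs
          simp only [List.length_cons, List.getD_cons_succ]
          constructor
          · intro hle
            obtain ⟨h1, h2, h3, h4⟩ := hih.mp (by omega)
            exact ⟨by omega, by omega, by omega, h4⟩
          · rintro ⟨h1, h2, h3, h4⟩
            have := hih.mpr ⟨by omega, by omega, by omega, h4⟩
            omega
        · rw [if_neg h]
          simp

lemma pvB_stage_append (t p : List Char) (j : Nat) :
    ∀ (l1 l2 : List Nat) (st : List Nat × Option Nat),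
    pvB_stage t p j (l1 ++ l2) st = pvB_stage t p j l2 (pvB_stage t p j l1 st) := by
  intro l1
  induction l1 with
  | nil => intro l2 st; rfl
  | cons a r ih =>
    intro l2 st
    rw [List.cons_append, pvB_stage, pvB_stage]
    split <;> rw [ih]

lemma pvB_stage_range (t p : List Char) (j : Nat) (hp : j < p.length) :
    ∀ m, m ≤ t.length →
    pvB_stage t p j ((List.range m).filter (fun i => decide (j ≤ lcpLen (t.drop i) p))) ([], none) =
      ((List.range m).filter (fun i => decide (j + 1 ≤ lcpLen (t.drop i) p)),
       argLast (fun i => lcpLen (t.drop i) p = j) m) := by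
  intro m
  induction m with
  | zero => intro _; rfl
  | succ m ih =>
    intro hm
    rw [List.range_succ, List.filter_append, List.filter_append,
      pvB_stage_append, ih (by omega), argLast]
    by_cases hcand : j ≤ lcpLen (t.drop m) p
    · have hxlen : (t.drop m).length = t.length - m := by simp
      have hcond : (m + j < t.length ∧ t.getD (m + j) ' ' = p.getD j ' ') ↔
          j + 1 ≤ lcpLen (t.drop m) p := by
        rw [lcp_succ_iff j (t.drop m) p, hxlen, getD_drop]
        constructor
        · rintro ⟨h1, h2⟩
          exact ⟨hcand, by omega, hp, h2⟩
        · rintro ⟨-, h1, -, h2⟩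
          exact ⟨by omega, h2⟩
      simp only [List.filter_cons, List.filter_nil, decide_eq_true hcand, if_true]
      rw [pvB_stage]
      by_cases hnext : j + 1 ≤ lcpLen (t.drop m) p
      · rw [if_pos (hcond.mpr hnext), pvB_stage]
        simp only [decide_eq_true hnext, if_true]
        rw [if_neg (show ¬ lcpLen (t.drop m) p = j by omega)]
      · have hnc : ¬ (m + j < t.length ∧ t.getD (m + j) ' ' = p.getD j ' ') :=
          fun hc => hnext (hcond.mp hc)
        rw [if_neg hnc, pvB_stage]
        simp only [decide_eq_false hnext]
        rw [if_pos (show lcpLen (t.drop m) p = j by omega)]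
        simp
    · simp only [List.filter_cons, List.filter_nil, decide_eq_false hcand,
        decide_eq_false (show ¬ j + 1 ≤ lcpLen (t.drop m) p by omega)]
      rw [if_neg (show ¬ lcpLen (t.drop m) p = j by omega)]
      simp [pvB_stage]

lemma cand_empty_iff (t p : List Char) (j : Nat) :
    candAt t p j = [] ↔ ∀ i, i < t.length → lcpLen (t.drop i) p < j := by
  rw [candAt, List.filter_eq_nil_iff]
  constructor
  · intro h i hi
    have := h i (List.mem_range.mpr hi)
    simpa using this
  · intro h i hi
    have := h i (List.mem_range.mp hi)
    simpa using this

-- B's best after all candidates have been exhausted below stage j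
lemma best_char (t p : List Char) :
    ∀ j, (∀ i, i < t.length → lcpLen (t.drop i) p < j) →
    1 ≤ gmax (fun i => lcpLen (t.drop i) p) t.length →
    bestAt t p j = (gmax (fun i => lcpLen (t.drop i) p) t.length,
      (argLast (fun i => lcpLen (t.drop i) p = gmax (fun i => lcpLen (t.drop i) p) t.length)
        t.length).map (fun i => (i : Int))) := by
  intro j
  induction j with
  | zero =>
    intro h hM
    obtain ⟨i, hi, hg⟩ := gmax_attained _ _ hM
    have := h i hi; omega
  | succ j ih =>
    intro h hM
    set M := gmax (fun i => lcpLen (t.drop i) p) t.length with hMdef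
    have hMle : M ≤ j := by
      have := gmax_le (fun i => lcpLen (t.drop i) p) t.length j
        (fun i hi => by simp only; have := h i hi; omega)
      omega
    rw [bestAt]
    by_cases hMj : M = j
    · obtain ⟨i0, hi0, hg0⟩ := gmax_attained _ _ hM
      have hne : argLast (fun i => lcpLen (t.drop i) p = j) t.length ≠ none := by
        intro hnone
        rw [argLast_none_iff] at hnone
        exact hnone i0 hi0 (by omega)
      obtain ⟨i1, hi1⟩ := Option.ne_none_iff_exists'.mp hne
      rw [hi1]
      rw [argLast_congr (fun i => lcpLen (t.drop i) p = M)
        (fun i => lcpLen (t.drop i) p = j) t.length (fun i _ => by rw [hMj]), hi1]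
      simp [hMj]
    · have hnone : argLast (fun i => lcpLen (t.drop i) p = j) t.length = none := by
        rw [argLast_none_iff]
        intro i hi hq
        have := gmax_ge (fun i => lcpLen (t.drop i) p) t.length i hi
        simp only at this
        omega
      rw [hnone]
      exact ih (fun i hi => by
        have := gmax_ge (fun i => lcpLen (t.drop i) p) t.length i hi
        simp only at this
        omega) hM

lemma argLast_some (q : Nat → Prop) [DecidablePred q] :
    ∀ k i, argLast q k = some i → i < k ∧ q i := by
  intro k
  induction k with
  | zero => intro i h; simp [argLast] at h
  | succ k ih =>
    intro i h
    rw [argLast] at h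
    by_cases hq : q k
    · rw [if_pos hq] at h
      cases h
      exact ⟨by omega, hq⟩
    · rw [if_neg hq] at h
      obtain ⟨h1, h2⟩ := ih i h
      exact ⟨by omega, h2⟩

lemma best_zero (t p : List Char) :
    ∀ j, gmax (fun i => lcpLen (t.drop i) p) t.length = 0 → (bestAt t p j).1 = 0 := by
  intro j hM
  induction j with
  | zero => rfl
  | succ j ih =>
    rw [bestAt]
    cases h : argLast (fun i => lcpLen (t.drop i) p = j) t.length with
    | none => exact ih
    | some i =>
      obtain ⟨hi, hq⟩ := argLast_some _ _ _ h
      have := gmax_ge (fun i => lcpLen (t.drop i) p) t.length i hi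
      simp only at this hq
      show j = 0
      omega

-- the common target value (A's result, in pvSpec language)
def pvTarget (t p : List Char) : Option Int × Int :=
  if 3 ≤ (pvSpec t p t.length).1
  then ((pvSpec t p t.length).2, ((pvSpec t p t.length).1 : Int))
  else (none, 0)

lemma pvV_eq_lcp (t p : List Char) (i : Nat) (h : lcpLen (t.drop i) p ≤ 258) :
    pvV t p i = lcpLen (t.drop i) p := by
  rw [pvV]; omega

lemma pvB_final_nil (b : Nat × Option Int) (j : Nat) :
    pvB_final (b, [], j) = if b.1 < 3 then (none, 0) else (b.2, (b.1 : Int)) := by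
  rw [pvB_final]
  simp

lemma pvB_final_some (b : Nat × Option Int) (cand : List Nat) (j : Nat) (h : cand ≠ []) :
    pvB_final (b, cand, j) =
      if j < 3 then (none, 0) else (some ((cand.getLastD 0 : Nat) : Int), (j : Int)) := by
  rw [pvB_final]
  simp [h]

lemma pvSpec_fst (t p : List Char) (k : Nat) :
    (pvSpec t p k).1 = gmax (pvV t p) k := by rw [pvSpec_char]

lemma pvSpec_snd (t p : List Char) (k : Nat) :
    (pvSpec t p k).2 =
      (if gmax (pvV t p) k = 0 then none
       else (argLast (fun i => pvV t p i = gmax (pvV t p) k) k).map (fun i => (i : Int))) := by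
  rw [pvSpec_char]

lemma final_empty (t p : List Char) (j : Nat)
    (h : ∀ i, i < t.length → lcpLen (t.drop i) p < j) (hj : j ≤ 258) :
    pvB_final (bestAt t p j, [], j) = pvTarget t p := by
  have hVL : ∀ i, i < t.length → pvV t p i = lcpLen (t.drop i) p :=
    fun i hi => pvV_eq_lcp t p i (by have := h i hi; omega)
  have hgm : gmax (pvV t p) t.length = gmax (fun i => lcpLen (t.drop i) p) t.length :=
    gmax_congr _ _ _ hVL
  rw [pvB_final_nil, pvTarget, pvSpec_fst, pvSpec_snd, hgm]
  by_cases hM0 : gmax (fun i => lcpLen (t.drop i) p) t.length = 0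
  · rw [if_pos (show (bestAt t p j).1 < 3 by rw [best_zero t p j hM0]; omega),
      if_neg (show ¬ 3 ≤ gmax (fun i => lcpLen (t.drop i) p) t.length by omega)]
  · rw [best_char t p j h (by omega)]
    dsimp only
    have hAL : argLast (fun i => pvV t p i = gmax (fun i => lcpLen (t.drop i) p) t.length)
          t.length =
        argLast (fun i => lcpLen (t.drop i) p = gmax (fun i => lcpLen (t.drop i) p) t.length)
          t.length :=
      argLast_congr _ _ _ (fun i hi =>
        (show pvV t p i = _ ↔ lcpLen (t.drop i) p = _ by rw [hVL i hi]))
    by_cases hM3 : 3 ≤ gmax (fun i => lcpLen (t.drop i) p) t.length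
    · rw [if_neg (by omega), if_pos hM3, if_neg hM0, hAL]
    · rw [if_pos (by omega), if_neg hM3]

lemma final_cap (t p : List Char) (h : candAt t p (min p.length 258) ≠ []) :
    pvB_final (bestAt t p (min p.length 258), candAt t p (min p.length 258),
      min p.length 258) = pvTarget t p := by
  obtain ⟨i0, hi0'⟩ := List.exists_mem_of_ne_nil _ h
  rw [candAt, List.mem_filter, List.mem_range] at hi0'
  have hi0 : i0 < t.length := hi0'.1
  have hL0 : min p.length 258 ≤ lcpLen (t.drop i0) p := by simpa using hi0'.2
  have hVle : ∀ i, i < t.length → pvV t p i ≤ min p.length 258 := fun i hi => by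
    have := lcpLen_le_right (t.drop i) p
    rw [pvV]; omega
  have hV0 : pvV t p i0 = min p.length 258 := by
    have := lcpLen_le_right (t.drop i0) p
    rw [pvV]; omega
  have hgm : gmax (pvV t p) t.length = min p.length 258 := by
    have h1 := gmax_le (pvV t p) t.length _ hVle
    have h2 := gmax_ge (pvV t p) t.length i0 hi0
    omega
  rw [pvB_final_some _ _ _ h, pvTarget, pvSpec_fst, pvSpec_snd, hgm]
  by_cases h3 : 3 ≤ min p.length 258
  · rw [if_neg (by omega), if_pos h3, if_neg (show ¬ min p.length 258 = 0 by omega)]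
    have hlast : (candAt t p (min p.length 258)).getLast? =
        argLast (fun i => pvV t p i = min p.length 258) t.length := by
      rw [candAt, argLast_filter]
      refine argLast_congr _ _ _ (fun i hi => ?_)
      show min p.length 258 ≤ lcpLen (t.drop i) p ↔ pvV t p i = min p.length 258
      have := lcpLen_le_right (t.drop i) p
      rw [pvV]
      constructor
      · intro h1; omega
      · intro h1; omega
    cases hAL : argLast (fun i => pvV t p i = min p.length 258) t.length with
    | none =>
      exfalso
      rw [argLast_none_iff] at hAL
      exact hAL i0 hi0 hV0
    | some i1 =>
      have hgl : (candAt t p (min p.length 258)).getLastD 0 = i1 := by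
        rw [List.getLastD_eq_getLast?, hlast, hAL]
        rfl
      rw [hgl]
      rfl
  · rw [if_pos (by omega), if_neg h3]

lemma loop_final (t p : List Char) :
    ∀ f j, j + f = min p.length 258 →
    pvB_final (pvB_go t p f j (candAt t p j) (bestAt t p j)) = pvTarget t p := by
  intro f
  induction f with
  | zero =>
    intro j hj
    have hj' : j = min p.length 258 := by omega
    subst hj'
    rw [pvB_go]
    by_cases hc : candAt t p (min p.length 258) = []
    · rw [hc]
      exact final_empty t p _ ((cand_empty_iff t p _).mp hc) (by omega)
    · exact final_cap t p hc
  | succ f ih =>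
    intro j hj
    rw [pvB_go]
    by_cases hc : candAt t p j = []
    · rw [if_pos hc, hc]
      exact final_empty t p j ((cand_empty_iff t p j).mp hc) (by omega)
    · rw [if_neg hc]
      have hstage := pvB_stage_range t p j (by omega) t.length (le_refl _)
      show pvB_final (pvB_go t p f (j + 1)
        (pvB_stage t p j (candAt t p j) ([], none)).1 _) = _
      rw [show pvB_stage t p j (candAt t p j) ([], none) =
        (candAt t p (j + 1), argLast (fun i => lcpLen (t.drop i) p = j) t.length) from hstage]
      have hbest : (match argLast (fun i => lcpLen (t.drop i) p = j) t.length with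
          | some i => ((j, some (i : Int)) : Nat × Option Int)
          | none => bestAt t p j) = bestAt t p (j + 1) := by
        rw [bestAt]
      simp only [hbest]
      exact ih (j + 1) (by omega)

-- ===== VERDICT (by name: the statement is the Claim_ definition above) =====
theorem string_search_spec : Claim_equal_string_search := by
  intro text pattern _
  unfold Spec_string_search
  have hB : string_search_alt text pattern = pvTarget text.toList pattern.toList := by
    simp only [string_search_alt]
    have hc0 : candAt text.toList pattern.toList 0 = List.range text.toList.length := by
      simp [candAt]
    have h := loop_final text.toList pattern.toList (min pattern.toList.length 258) 0 (by omega)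
    rw [hc0, show bestAt text.toList pattern.toList 0 = (0, none) from rfl] at h
    exact h
  rw [hB]
  simp only [string_search]
  rw [pvA_fold text.toList pattern.toList text.toList.length (le_refl _), pvTarget]
  by_cases h3 : 3 ≤ (pvSpec text.toList pattern.toList text.toList.length).1
  · have hmm : max (pvSpec text.toList pattern.toList text.toList.length).1 1 =
        (pvSpec text.toList pattern.toList text.toList.length).1 := by omega
    obtain ⟨j, hj⟩ : ∃ j, (pvSpec text.toList pattern.toList text.toList.length).2 = some j := by
      rcases pvSpec_cases text.toList pattern.toList text.toList.length with h | h
      · omega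
      · exact h
    have hlt : ¬ (((pvSpec text.toList pattern.toList text.toList.length).1 : Int) < 3) := by
      omega
    rw [if_pos h3]
    simp only [hmm, hj, if_neg hlt]
    rw [if_neg (Option.some_ne_none j)]
  · have hlt : ((max (pvSpec text.toList pattern.toList text.toList.length).1 1 : Nat) : Int) < 3 := by
      omega
    rw [if_neg h3]
    simp only [if_pos hlt]
    simp
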